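-- pv_equiv track=rewrite | github.com/tkgowtham/30DaysOfDSA | Day14/9_Maximum_of_Miniumum_of_Every_Window_Size.py | maxMinWindow
-- ===== SOURCE A (Python) =====
-- from collections import deque
--
-- def maxMinWindow(arr, n):
--     def minWindow(arr, k):
--         deque_window = deque()
--         res = []
--
--         for index, num in enumerate(arr):
--             if deque_window and deque_window[0] == index - k:
--                 deque_window.popleft()
--
--             while deque_window and arr[deque_window[-1]] > num:
--                 deque_window.pop()
--
--             deque_window.append(index)
--
--             if index >= k - 1:
--                 res.append(arr[deque_window[0]])
--
--         return res
--
--     res = []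
--     for i in range(1, n+1):
--         res.append(max(minWindow(arr, i)))
--
--     return res
-- ===== SOURCE B (Python) =====
-- def maxMinWindow(arr, n):
--     m = len(arr)
--     return [max(min(arr[i:i + k]) for i in range(m - k + 1)) for k in range(1, n + 1)]
-- ===== Notes on version B (the rewrite author's own statement) =====
-- stated objective: simpler
-- what changed: B replaces the per-size monotonic-deque sliding-minimum loop with a direct two-level comprehension: for each window size k, the max over all windows of min(arr[i:i+k]).
import Mathlib
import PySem

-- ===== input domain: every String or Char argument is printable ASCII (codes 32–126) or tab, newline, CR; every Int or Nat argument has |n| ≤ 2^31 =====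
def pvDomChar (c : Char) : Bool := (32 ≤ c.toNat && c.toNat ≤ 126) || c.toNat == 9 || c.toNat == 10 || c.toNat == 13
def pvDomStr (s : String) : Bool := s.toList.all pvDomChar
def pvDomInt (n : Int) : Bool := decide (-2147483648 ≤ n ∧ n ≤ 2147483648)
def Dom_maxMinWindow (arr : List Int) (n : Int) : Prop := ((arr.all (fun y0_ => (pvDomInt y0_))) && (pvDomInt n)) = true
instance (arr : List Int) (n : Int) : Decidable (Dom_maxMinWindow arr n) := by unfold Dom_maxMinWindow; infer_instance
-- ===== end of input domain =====

-- B changes the algorithm (no deque): for each size k it takes max over windows of min(arr[i:i+k]); simpler, not faster.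

-- ===== PORT A =====
-- 'while deque_window and arr[deque_window[-1]] > num: deque_window.pop()'
def popBackA (arr : List Int) (num : Int) : List Int → List Int
  | [] => []
  | d :: ds =>
    if PySem.List.pyGetD arr ((d :: ds).getLast (by simp)) 0 > num
    then popBackA arr num (d :: ds).dropLast
    else d :: ds
termination_by l => l.length
decreasing_by simp [List.length_dropLast]

-- inner helper 'minWindow(arr, k)' of A (deque of indices, kept as a list: head = left end)
def minWindowA (arr : List Int) (k : Int) : List Int :=
  ((PySem.List.enumerate arr).foldl
    (fun (s : List Int × List Int) (p : Int × Int) =>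
      let dq := s.1
      let res := s.2
      let index := p.1
      let num := p.2
      let dq := match dq with
        | [] => ([] : List Int)
        | d0 :: rest => if d0 = index - k then rest else d0 :: rest
      let dq := popBackA arr num dq
      let dq := dq ++ [index]
      let res := if index ≥ k - 1
        then res ++ [PySem.List.pyGetD arr (dq.headI) 0]
        else res
      (dq, res)) ([], [])).2

def maxMinWindow (arr : List Int) (n : Int) : List Int :=
  (PySem.List.pyRange 1 (n + 1) 1).foldl
    (fun res i => res ++ [(PySem.List.max? (minWindowA arr i) (fun x => x)).getD 0]) []

-- ===== PORT B =====
def maxMinWindow_alt (arr : List Int) (n : Int) : List Int :=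
  (PySem.List.pyRange 1 (n + 1) 1).map (fun k =>
    (PySem.List.max?
      ((PySem.List.pyRange 0 ((arr.length : Int) - k + 1) 1).map (fun i =>
        (PySem.List.min? (PySem.List.slice arr (some i) (some (i + k))) (fun x => x)).getD 0))
      (fun x => x)).getD 0)

-- ===== PRECONDITION & SPEC =====
-- A raises ValueError (max of an empty window list) exactly when n > len(arr); B raises there too.
def Pre_maxMinWindow (arr : List Int) (n : Int) : Prop := n ≤ (arr.length : Int)
instance (arr : List Int) (n : Int) : Decidable (Pre_maxMinWindow arr n) := by
  unfold Pre_maxMinWindow; infer_instance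
def pvWitness_maxMinWindow : List Int × Int := ([3, 1, 2, 4], 3)

def Spec_maxMinWindow (arr : List Int) (n : Int) (out : List Int) : Prop := out = maxMinWindow_alt arr n
instance (arr : List Int) (n : Int) (out : List Int) : Decidable (Spec_maxMinWindow arr n out) := by unfold Spec_maxMinWindow; infer_instance

-- ===== CLAIM (what is proved, stated in full; the proofs are below) =====
def Claim_equal_maxMinWindow : Prop := ∀ (arr : List Int) (n : Int), Dom_maxMinWindow arr n → Pre_maxMinWindow arr n → Spec_maxMinWindow arr n (maxMinWindow arr n)

-- ===== LEMMAS AND PROOFS =====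

-- min of a nonempty list, Python-style (the 0 default is never used on an empty list)
def minOf : List Int → Int
  | [] => 0
  | x :: t => t.foldl min x

-- value at a Nat index
def valA (a : List Int) (j : Nat) : Int := a.getD j 0

-- 'j is a suffix minimum of the processed prefix 0..t-1'
def sufB (a : List Int) (t j : Nat) : Bool := decide (∀ j' < t, j < j' → valA a j ≤ valA a j')

-- deque model after processing indices 0..t-1, window size kn
def dqM (a : List Int) (kn t : Nat) : List Nat :=
  (List.range t).filter (fun j => decide (t ≤ j + kn) && sufB a t j)

-- intermediate deque model: after the popleft at step t (window already shifted to end at t)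
def dqJ (a : List Int) (kn t : Nat) : List Nat :=
  (List.range t).filter (fun j => decide (t + 1 ≤ j + kn) && sufB a t j)

-- result model
def resM (a : List Int) (kn t : Nat) : List Int :=
  (List.range (t + 1 - kn)).map (fun i => minOf ((a.drop i).take kn))

-- the loop body of minWindowA, named (definitionally equal to the inline lambda)
def stepF (arr : List Int) (k : Int) (s : List Int × List Int) (p : Int × Int) :
    List Int × List Int :=
  let dq := s.1
  let res := s.2
  let index := p.1
  let num := p.2
  let dq := match dq with
    | [] => ([] : List Int)
    | d0 :: rest => if d0 = index - k then rest else d0 :: rest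
  let dq := popBackA arr num dq
  let dq := dq ++ [index]
  let res := if index ≥ k - 1
    then res ++ [PySem.List.pyGetD arr (dq.headI) 0]
    else res
  (dq, res)

lemma minWindowA_eq_foldl (arr : List Int) (k : Int) :
    minWindowA arr k = ((PySem.List.enumerate arr).foldl (stepF arr k) ([], [])).2 := rfl

-- ---- basic facts ----
lemma minOf_le (l : List Int) (x : Int) (hx : x ∈ l) : minOf l ≤ x := by
  cases l with
  | nil => cases hx
  | cons y t =>
    rcases List.mem_cons.mp hx with rfl | h
    · exact (PySem.List.foldl_min_le t x).1
    · exact (PySem.List.foldl_min_le t y).2 x h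

lemma minOf_mem (l : List Int) (h : l ≠ []) : minOf l ∈ l := by
  cases l with
  | nil => exact absurd rfl h
  | cons y t =>
    rcases PySem.List.foldl_min_mem t y with h1 | h1
    · simp [minOf, h1]
    · simp [minOf]; exact Or.inr h1

lemma min?_getD_eq (l : List Int) (h : l ≠ []) :
    (PySem.List.min? l (fun x => x)).getD 0 = minOf l := by
  cases l with
  | nil => exact absurd rfl h
  | cons y t => rw [PySem.List.min?_id_cons]; rfl


-- ---- popBack ----
lemma popBack_concat (arr : List Int) (num : Int) (l : List Int) (x : Int) :
    popBackA arr num (l ++ [x]) =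
      if PySem.List.pyGetD arr x 0 > num then popBackA arr num l else l ++ [x] := by
  cases l with
  | nil => simp [popBackA]
  | cons a l =>
    rw [show (a :: l) ++ [x] = a :: (l ++ [x]) from rfl, popBackA]
    rw [List.getLast_cons (show l ++ [x] ≠ [] by simp),
        List.getLast_concat, show (a :: (l ++ [x])).dropLast = a :: l by rw [← List.cons_append]; exact List.dropLast_concat]

lemma popBack_eq_filter (arr : List Int) (num : Int) (l : List Int)
    (h : l.Pairwise (fun i j => PySem.List.pyGetD arr i 0 ≤ PySem.List.pyGetD arr j 0)) :
    popBackA arr num l = l.filter (fun j => decide (PySem.List.pyGetD arr j 0 ≤ num)) := by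
  induction l using List.reverseRecOn with
  | nil => simp [popBackA]
  | append_singleton l x ih =>
    rw [popBack_concat, List.filter_append]
    rcases le_or_gt (PySem.List.pyGetD arr x 0) num with hle | hgt
    · rw [if_neg (by omega)]
      have hall : ∀ j ∈ l, PySem.List.pyGetD arr j 0 ≤ num := by
        intro j hj
        have := (List.pairwise_append.mp h).2.2 j hj x (by simp)
        omega
      rw [List.filter_eq_self.mpr (fun j hj => decide_eq_true (hall j hj))]
      simp [hle]
    · rw [if_pos hgt, ih (h.sublist (by simp))]
      simp [show ¬ (PySem.List.pyGetD arr x 0 ≤ num) by omega]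

-- ---- dq model facts ----
lemma dqM_sorted (a : List Int) (kn t : Nat) : (dqM a kn t).Pairwise (· < ·) := by
  exact List.Pairwise.sublist (List.filter_sublist) List.pairwise_lt_range

lemma mem_dqM (a : List Int) (kn t j : Nat) :
    j ∈ dqM a kn t ↔ j < t ∧ t ≤ j + kn ∧ sufB a t j = true := by
  simp [dqM, List.mem_filter, List.mem_range]

lemma mem_dqJ (a : List Int) (kn t j : Nat) :
    j ∈ dqJ a kn t ↔ j < t ∧ t + 1 ≤ j + kn ∧ sufB a t j = true := by
  simp [dqJ, List.mem_filter, List.mem_range]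

lemma sufB_le (a : List Int) (t j j' : Nat) (hs : sufB a t j = true)
    (h1 : j < j') (h2 : j' < t) : valA a j ≤ valA a j' := by
  have := of_decide_eq_true hs
  exact this j' h2 h1

-- values along dqJ are non-decreasing (as Int-indexed pyGetD values, after mapping)
lemma dqJ_vals_pairwise (a : List Int) (kn t : Nat) :
    ((dqJ a kn t).map (fun j : Nat => (j : Int))).Pairwise
      (fun i j => PySem.List.pyGetD a i 0 ≤ PySem.List.pyGetD a j 0) := by
  have hp : (dqJ a kn t).Pairwise (· < ·) :=
    List.Pairwise.sublist (List.filter_sublist) List.pairwise_lt_range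
  have hp2 : (dqJ a kn t).Pairwise
      (fun (i j : Nat) => PySem.List.pyGetD a (i : Int) 0 ≤ PySem.List.pyGetD a (j : Int) 0) := by
    refine hp.imp_of_mem ?_
    intro i j hi hj hij
    have h1 := (mem_dqJ a kn t i).mp hi
    have h2 := (mem_dqJ a kn t j).mp hj
    rw [PySem.List.pyGetD_natCast, PySem.List.pyGetD_natCast]
    exact sufB_le a t i j h1.2.2 hij h2.1
  exact List.pairwise_map.mpr hp2

-- ---- popleft step ----
lemma popleft_step (a : List Int) (kn t : Nat) (hk : 1 ≤ kn) :
    (match (dqM a kn t).map (fun j : Nat => (j : Int)) with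
      | [] => ([] : List Int)
      | d0 :: rest => if d0 = (t : Int) - (kn : Int) then rest else d0 :: rest) =
    (dqJ a kn t).map (fun j : Nat => (j : Int)) := by
  by_cases hlt : t < kn
  · have heq : dqM a kn t = dqJ a kn t := by
      unfold dqM dqJ
      exact List.filter_congr (fun j hj => by
        have := List.mem_range.mp hj
        simp [show t ≤ j + kn by omega, show t + 1 ≤ j + kn by omega])
    rw [heq]
    cases h : (dqJ a kn t).map (fun j : Nat => (j : Int)) with
    | nil => rfl
    | cons d0 rest =>
      have hd0 : d0 ∈ (dqJ a kn t).map (fun j : Nat => (j : Int)) := by rw [h]; simp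
      obtain ⟨j, _, rfl⟩ := List.mem_map.mp hd0
      show (if (j : Int) = (t : Int) - (kn : Int) then rest else (j : Int) :: rest) =
        (j : Int) :: rest
      rw [if_neg (by intro hcon; omega)]
  · rw [not_lt] at hlt
    have hsplit : List.range t = List.range (t - kn) ++ (List.range kn).map (· + (t - kn)) := by
      have h1 : t = (t - kn) + kn := by omega
      conv_lhs => rw [h1]
      rw [List.range_add]
      congr 1
      exact List.map_congr_left (fun i _ => by omega)
    have hkn1 : kn = (kn - 1) + 1 := by omega
    have hrange : List.range kn = 0 :: (List.range (kn - 1)).map Nat.succ := by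
      conv_lhs => rw [hkn1]
      exact List.range_succ_eq_map
    have h2 : (List.range kn).map (· + (t - kn)) =
        (t - kn) :: (List.range (kn - 1)).map (fun i => i + 1 + (t - kn)) := by
      rw [hrange]; simp [List.map_map, Function.comp]
    have hfail : ∀ P : Nat → Bool, ∀ c : Nat, t ≤ c → (List.range (t - kn)).filter
        (fun j => decide (c ≤ j + kn) && P j) = [] := by
      intro P c hc
      rw [List.filter_eq_nil_iff]
      intro j hj
      have := List.mem_range.mp hj
      simp [show ¬ (c ≤ j + kn) by omega]
    have htail : ∀ j ∈ (List.range (kn - 1)).map (fun i => i + 1 + (t - kn)),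
        (decide (t ≤ j + kn) && sufB a t j) = (decide (t + 1 ≤ j + kn) && sufB a t j) := by
      intro j hj
      obtain ⟨i, hi, rfl⟩ := List.mem_map.mp hj
      simp [show t ≤ i + 1 + (t - kn) + kn by omega, show t + 1 ≤ i + 1 + (t - kn) + kn by omega]
    have hdqJ : dqJ a kn t =
        ((List.range (kn - 1)).map (fun i => i + 1 + (t - kn))).filter
          (fun j => decide (t + 1 ≤ j + kn) && sufB a t j) := by
      unfold dqJ
      rw [hsplit, List.filter_append, hfail _ (t + 1) (by omega), List.nil_append, h2,
        List.filter_cons]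
      simp [show ¬ (t + 1 ≤ (t - kn) + kn) by omega]
    have hdqM : dqM a kn t =
        (if sufB a t (t - kn) = true then [t - kn] else []) ++
        ((List.range (kn - 1)).map (fun i => i + 1 + (t - kn))).filter
          (fun j => decide (t + 1 ≤ j + kn) && sufB a t j) := by
      unfold dqM
      rw [hsplit, List.filter_append, hfail _ t le_rfl, List.nil_append, h2, List.filter_cons]
      rw [← List.filter_congr htail]
      by_cases hs : sufB a t (t - kn) = true
      · simp [hs, show t ≤ (t - kn) + kn by omega]
      · simp [hs, show t ≤ (t - kn) + kn by omega]
    by_cases hs : sufB a t (t - kn) = true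
    · rw [hdqM, ← hdqJ, if_pos hs, List.cons_append, List.nil_append, List.map_cons]
      show (if ((t - kn : Nat) : Int) = (t : Int) - (kn : Int) then
          (dqJ a kn t).map (fun j : Nat => (j : Int))
        else ((t - kn : Nat) : Int) :: (dqJ a kn t).map (fun j : Nat => (j : Int))) = _
      rw [if_pos (by omega)]
    · rw [hdqM, ← hdqJ, if_neg hs, List.nil_append]
      cases h : (dqJ a kn t).map (fun j : Nat => (j : Int)) with
      | nil => rfl
      | cons d0 rest =>
        have hd0 : d0 ∈ (dqJ a kn t).map (fun j : Nat => (j : Int)) := by rw [h]; simp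
        obtain ⟨j, hjm, rfl⟩ := List.mem_map.mp hd0
        have hj2 := (mem_dqJ a kn t j).mp hjm
        show (if (j : Int) = (t : Int) - (kn : Int) then rest else (j : Int) :: rest) =
          (j : Int) :: rest
        rw [if_neg (by intro hcon; have := hj2.2.1; omega)]

-- ---- pop-while + append step ----
lemma sufB_succ (a : List Int) (t j : Nat) (hj : j < t) :
    sufB a (t + 1) j = (sufB a t j && decide (valA a j ≤ valA a t)) := by
  unfold sufB
  rw [Bool.eq_iff_iff]
  simp only [Bool.and_eq_true, decide_eq_true_eq]
  constructor
  · intro h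
    exact ⟨fun j' h1 h2 => h j' (by omega) h2, h t (by omega) hj⟩
  · rintro ⟨h1, h2⟩ j' hlt' hgt
    by_cases hcase : j' < t
    · exact h1 j' hcase hgt
    · have : j' = t := by omega
      subst this
      exact h2

lemma popback_append_step (a : List Int) (kn t : Nat) (hk : 1 ≤ kn) (ht : t < a.length) :
    popBackA a (valA a t) ((dqJ a kn t).map (fun j : Nat => (j : Int))) ++ [(t : Int)] =
    (dqM a kn (t + 1)).map (fun j : Nat => (j : Int)) := by
  rw [popBack_eq_filter a (valA a t) _ (dqJ_vals_pairwise a kn t), List.filter_map]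
  have h1 : (dqJ a kn t).filter
      ((fun j : Int => decide (PySem.List.pyGetD a j 0 ≤ valA a t)) ∘ (fun j : Nat => (j : Int))) =
      (dqJ a kn t).filter (fun j : Nat => decide (valA a j ≤ valA a t)) := by
    apply List.filter_congr
    intro j _
    simp [Function.comp, PySem.List.pyGetD_natCast, valA]
  rw [h1]
  have h2 : (dqJ a kn t).filter (fun j : Nat => decide (valA a j ≤ valA a t)) =
      (List.range t).filter (fun j => decide (t + 1 ≤ j + kn) && sufB a (t + 1) j) := by
    unfold dqJ
    rw [List.filter_filter]
    apply List.filter_congr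
    intro j hj
    have hjt := List.mem_range.mp hj
    rw [sufB_succ a t j hjt]
    cases hb : sufB a t j <;> cases hc : decide (valA a j ≤ valA a t) <;>
      cases hd : decide (t + 1 ≤ j + kn) <;> simp
  rw [h2]
  have hst : sufB a (t + 1) t = true := by
    unfold sufB
    rw [decide_eq_true_eq]
    intro j' h1' h2'
    exact absurd h1' (by omega)
  have h3 : dqM a kn (t + 1) =
      (List.range t).filter (fun j => decide (t + 1 ≤ j + kn) && sufB a (t + 1) j) ++ [t] := by
    unfold dqM
    rw [List.range_succ, List.filter_append]
    congr 1
    rw [List.filter_cons]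
    simp [show t + 1 ≤ t + kn by omega, hst]
  rw [h3, List.map_append]
  rfl

-- ---- head of the deque is the window minimum ----
lemma dqM_head_min (a : List Int) (kn s : Nat) (hk : 1 ≤ kn) (hks : kn ≤ s)
    (hs : s ≤ a.length) :
    ∃ h rest, dqM a kn s = h :: rest ∧ valA a h = minOf ((a.drop (s - kn)).take kn) := by
  set w := (a.drop (s - kn)).take kn with hw
  have hwlen : w.length = kn := by
    rw [hw, List.length_take, List.length_drop]
    omega
  have hget : ∀ (i : Nat) (hi : i < w.length), w[i] = valA a (s - kn + i) := by
    intro i hi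
    have hiw : i < kn := by omega
    simp only [hw, List.getElem_take, List.getElem_drop]
    unfold valA
    rw [List.getD_eq_getElem a 0 (by omega)]
  have hval : ∀ j, s - kn ≤ j → j < s → valA a j ∈ w := by
    intro j hj1 hj2
    have hidx : j - (s - kn) < w.length := by omega
    have h := hget (j - (s - kn)) hidx
    rw [show s - kn + (j - (s - kn)) = j by omega] at h
    rw [← h]
    exact List.getElem_mem hidx
  have hwne : w ≠ [] := List.ne_nil_of_length_pos (by omega)
  set M := minOf w with hM
  have hMle : ∀ j, s - kn ≤ j → j < s → M ≤ valA a j := fun j h1 h2 =>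
    minOf_le w _ (hval j h1 h2)
  have hMmem : M ∈ w := minOf_mem w hwne
  obtain ⟨iM, hiM, hiMv⟩ := List.mem_iff_getElem.mp hMmem
  have hiMval : valA a (s - kn + iM) = M := by
    rw [← hiMv, hget iM hiM]
  set P : Nat → Prop := fun j => s - kn ≤ j ∧ valA a j = M with hP
  have hPw : P (s - kn + iM) := ⟨by omega, hiMval⟩
  set js : Nat := Nat.findGreatest P (s - 1) with hjs
  have hPjs : P js := Nat.findGreatest_spec (m := s - kn + iM) (by omega) hPw
  have hjsle : js ≤ s - 1 := Nat.findGreatest_le (s - 1)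
  have hsuf : sufB a s js = true := by
    unfold sufB
    rw [decide_eq_true_eq]
    intro j' h1 h2
    rw [hPjs.2]
    exact hMle j' (by omega) h1
  have hjsmem : js ∈ dqM a kn s := (mem_dqM a kn s js).mpr ⟨by omega, by omega, hsuf⟩
  cases hdq : dqM a kn s with
  | nil => rw [hdq] at hjsmem; cases hjsmem
  | cons h rest =>
    refine ⟨h, rest, rfl, ?_⟩
    have hhmem : h ∈ dqM a kn s := by rw [hdq]; simp
    have hh := (mem_dqM a kn s h).mp hhmem
    have hhle : h ≤ js := by
      have hsorted := dqM_sorted a kn s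
      rw [hdq] at hsorted hjsmem
      rcases List.mem_cons.mp hjsmem with heq | hmem
      · omega
      · exact le_of_lt ((List.pairwise_cons.mp hsorted).1 js hmem)
    have hge : M ≤ valA a h := hMle h (by omega) hh.1
    have hle : valA a h ≤ M := by
      by_cases hcase : h = js
      · rw [hcase, hPjs.2]
      · rw [← hPjs.2]
        exact sufB_le a s h js hh.2.2 (by omega) (by omega)
    omega

-- ---- the main invariant ----
lemma run_invariant (a : List Int) (kn : Nat) (hk : 1 ≤ kn) (t : Nat) (ht : t ≤ a.length) :
    (PySem.List.enumerate (a.take t)).foldl (stepF a (kn : Int)) ([], []) =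
      ((dqM a kn t).map (fun j : Nat => (j : Int)), resM a kn t) := by
  induction t with
  | zero =>
    simp [dqM, resM, show 1 - kn = 0 by omega]
  | succ t ih =>
    have htl : t < a.length := by omega
    have htake : a.take (t + 1) = a.take t ++ [a[t]] := by
      rw [List.take_add_one, List.getElem?_eq_getElem htl]
      rfl
    have hlen : (a.take t).length = t := by
      rw [List.length_take]
      omega
    rw [htake, PySem.List.enumerate_append, hlen, List.foldl_append, ih (by omega)]
    have henum : PySem.List.enumerate [a[t]] ((0 : Int) + (t : Int)) = [((t : Int), a[t])] := by
      simp [PySem.List.enumerate]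
    rw [henum, List.foldl_cons, List.foldl_nil]
    show stepF a (kn : Int) _ _ = _
    unfold stepF
    simp only []
    rw [popleft_step a kn t hk]
    have hpb := popback_append_step a kn t hk htl
    rw [show valA a t = a[t] from List.getD_eq_getElem a 0 htl] at hpb
    rw [hpb]
    by_cases hknt : kn ≤ t + 1
    · rw [if_pos (by omega : ((t : Int)) ≥ (kn : Int) - 1)]
      obtain ⟨h, rest, hdq, hhv⟩ := dqM_head_min a kn (t + 1) hk hknt (by omega)
      rw [hdq]
      have hres : resM a kn (t + 1) = resM a kn t ++ [minOf ((a.drop (t + 1 - kn)).take kn)] := by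
        unfold resM
        rw [show t + 1 + 1 - kn = (t + 1 - kn) + 1 by omega, List.range_succ, List.map_append]
        rfl
      rw [hres]
      simp only [List.map_cons, List.headI, PySem.List.pyGetD_natCast]
      rw [show a.getD h 0 = valA a h from rfl, hhv]
    · rw [if_neg (by omega : ¬ ((t : Int)) ≥ (kn : Int) - 1)]
      have hres : resM a kn (t + 1) = resM a kn t := by
        unfold resM
        rw [show t + 1 + 1 - kn = t + 1 - kn by omega]
      rw [hres]

lemma minWindowA_eq_map (a : List Int) (kn : Nat) (hk : 1 ≤ kn) (_hkm : kn ≤ a.length) :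
    minWindowA a (kn : Int) =
      (List.range (a.length + 1 - kn)).map (fun i => minOf ((a.drop i).take kn)) := by
  have h := run_invariant a kn hk a.length le_rfl
  rw [List.take_length] at h
  rw [minWindowA_eq_foldl, h]
  rfl

-- B's inner list equals the same window-min list
lemma alt_inner_eq_map (a : List Int) (kn : Nat) (_hk : 1 ≤ kn) (hkm : kn ≤ a.length) :
    (PySem.List.pyRange 0 ((a.length : Int) - (kn : Int) + 1) 1).map (fun i =>
        (PySem.List.min? (PySem.List.slice a (some i) (some (i + (kn : Int)))) (fun x => x)).getD 0) =
      (List.range (a.length + 1 - kn)).map (fun i => minOf ((a.drop i).take kn)) := by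
  rw [PySem.List.pyRange_one]
  rw [show (((a.length : Int) - (kn : Int) + 1) - 0).toNat = a.length + 1 - kn by omega]
  rw [List.map_map]
  apply List.map_congr_left
  intro i hi
  have hilt := List.mem_range.mp hi
  simp only [Function.comp, zero_add]
  rw [show (i : Int) + (kn : Int) = ((i + kn : Nat) : Int) by push_cast; ring]
  rw [PySem.List.slice_natCast, show i + kn - i = kn by omega]
  exact min?_getD_eq _ (List.ne_nil_of_length_pos (by
    rw [List.length_take, List.length_drop]
    omega))

-- ===== VERDICT (by name: the statement is the Claim_ definition above) =====
theorem maxMinWindow_spec : Claim_equal_maxMinWindow := by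
  intro arr n _hdom hpre
  unfold Spec_maxMinWindow maxMinWindow maxMinWindow_alt
  rw [PySem.List.foldl_append_singleton_eq_map, List.nil_append]
  apply List.map_congr_left
  intro k hk
  have hk' := PySem.List.mem_pyRange_one.mp hk
  have h1 : 1 ≤ k := hk'.1
  have h2 : k ≤ (arr.length : Int) := le_trans (by omega) hpre
  have hkn : k = ((k.toNat : Nat) : Int) := by omega
  have hk1 : 1 ≤ k.toNat := by omega
  have hk2 : k.toNat ≤ arr.length := by omega
  rw [hkn, minWindowA_eq_map arr k.toNat hk1 hk2, alt_inner_eq_map arr k.toNat hk1 hk2]
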